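-- pv_equiv track=rewrite | github.com/jasisz/vera-bench | vera_bench/runner.py | _strip_aver_main
-- ===== SOURCE A (Python) =====
-- def _strip_aver_main(code: str) -> str:
--     """Remove fn main() and its body from Aver code."""
--     lines = code.split("\n")
--     result_lines = []
--     skip = False
--     for line in lines:
--         stripped = line.strip()
--         if stripped.startswith("fn main(") or stripped.startswith("fn main ()"):
--             skip = True
--             continue
--         if skip:
--             # main body is indented; stop skipping at next top-level item
--             if stripped and not line[0:1].isspace():
--                 skip = False
--             else:
--                 continue
--         if not skip:
--             result_lines.append(line)
--     return "\n".join(result_lines)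
-- ===== SOURCE B (Python) =====
-- def _starts_main(stripped):
--     return stripped.startswith("fn main(") or stripped.startswith("fn main ()")
--
--
-- def _is_header(line):
--     s = line.strip()
--     return _starts_main(s) or (bool(s) and not line[0:1].isspace())
--
--
-- def _strip_aver_main(code: str) -> str:
--     """Group lines into top-level blocks, drop the fn main() blocks, flatten."""
--     groups = []
--     cur = []
--     for line in code.split("\n"):
--         if _is_header(line):
--             if cur:
--                 groups.append(cur)
--             cur = [line]
--         else:
--             cur.append(line)
--     if cur:
--         groups.append(cur)
--     kept = [g for g in groups if not _starts_main(g[0].strip())]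
--     return "\n".join(line for g in kept for line in g)
-- ===== Notes on version B (the rewrite author's own statement) =====
-- stated objective: alternative
-- what changed: Replaced A's single-pass skip-flag scan with a build-then-filter decomposition: lines are first partitioned into top-level groups (a new group starts at any main header or top-level nonblank line), then every group headed by a 'fn main' line is filtered out and the rest flattened.
import Mathlib
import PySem

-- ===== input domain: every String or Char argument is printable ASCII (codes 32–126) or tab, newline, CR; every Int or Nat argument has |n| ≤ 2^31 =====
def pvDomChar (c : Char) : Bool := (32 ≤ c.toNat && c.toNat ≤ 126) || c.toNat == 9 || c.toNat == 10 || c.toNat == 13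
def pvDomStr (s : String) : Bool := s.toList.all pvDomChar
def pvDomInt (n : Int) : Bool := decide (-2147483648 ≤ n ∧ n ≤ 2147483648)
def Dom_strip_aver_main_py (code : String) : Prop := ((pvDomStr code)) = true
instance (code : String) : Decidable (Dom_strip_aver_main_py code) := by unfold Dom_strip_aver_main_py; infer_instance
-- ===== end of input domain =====

-- B strips fn main() blocks by a build-groups-then-filter decomposition instead of A's skip-flag scan (alternative, same cost).

-- ===== PORT A =====
-- literal transliteration of A: one foldl over the lines carrying (result_lines, skip).
-- code.split("\n") is Str.split? with the nonempty literal separator, so .getD [] never fires.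
def strip_aver_main_py (code : String) : String :=
  let lines := (PySem.Str.split? code "\n").getD []
  let st := lines.foldl (fun (st : List String × Bool) line =>
    let stripped := PySem.Str.strip line
    if PySem.Str.startswith stripped "fn main(" || PySem.Str.startswith stripped "fn main ()" then
      (st.1, true)
    else if st.2 then
      if (stripped != "") && !(PySem.Str.strIsspace (PySem.Str.slice line (some 0) (some 1))) then
        (st.1 ++ [line], false)
      else (st.1, true)
    else (st.1 ++ [line], false)) (([] : List String), false)
  PySem.Str.join "\n" st.1

-- ===== PORT B =====
-- helpers of Source B
def startsMainB (stripped : String) : Bool :=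
  PySem.Str.startswith stripped "fn main(" || PySem.Str.startswith stripped "fn main ()"

def isHeaderB (line : String) : Bool :=
  let s := PySem.Str.strip line
  startsMainB s || ((s != "") && !(PySem.Str.strIsspace (PySem.Str.slice line (some 0) (some 1))))

-- build top-level groups, filter out main-headed groups, flatten
def strip_aver_main_py_alt (code : String) : String :=
  let st := ((PySem.Str.split? code "\n").getD []).foldl
    (fun (st : List (List String) × List String) line =>
      if isHeaderB line then
        (st.1 ++ (if st.2.isEmpty then [] else [st.2]), [line])
      else (st.1, st.2 ++ [line]))
    (([] : List (List String)), ([] : List String))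
  let groups := st.1 ++ (if st.2.isEmpty then [] else [st.2])
  let kept := groups.filter (fun g => !(startsMainB (PySem.Str.strip (g.headD ""))))
  PySem.Str.join "\n" kept.flatten

-- ===== PRECONDITION & SPEC =====
def Spec_strip_aver_main_py (code : String) (out : String) : Prop := out = strip_aver_main_py_alt code
instance (code : String) (out : String) : Decidable (Spec_strip_aver_main_py code out) := by unfold Spec_strip_aver_main_py; infer_instance

-- ===== CLAIM (what is proved, stated in full; the proofs are below) =====
def Claim_equal_strip_aver_main_py : Prop := ∀ (code : String), Dom_strip_aver_main_py code → Spec_strip_aver_main_py code (strip_aver_main_py code)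

-- ===== LEMMAS AND PROOFS =====

-- line predicates (definitionally the expressions both ports use)
def pvIsMain (l : String) : Bool := startsMainB (PySem.Str.strip l)
def pvTop (l : String) : Bool :=
  (PySem.Str.strip l != "") && !(PySem.Str.strIsspace (PySem.Str.slice l (some 0) (some 1)))

theorem isHeaderB_eq (l : String) : isHeaderB l = (pvIsMain l || pvTop l) := rfl

-- A's step function (definitionally the lambda of strip_aver_main_py)
def pvStepA (st : List String × Bool) (l : String) : List String × Bool :=
  if pvIsMain l then (st.1, true)
  else if st.2 then (if pvTop l then (st.1 ++ [l], false) else (st.1, true))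
  else (st.1 ++ [l], false)

-- B's step function (definitionally the lambda of strip_aver_main_py_alt)
def pvStepB (st : List (List String) × List String) (line : String) :
    List (List String) × List String :=
  if isHeaderB line then
    (st.1 ++ (if st.2.isEmpty then [] else [st.2]), [line])
  else (st.1, st.2 ++ [line])

-- the flattened kept lines of a B fold state (definitionally the tail of strip_aver_main_py_alt)
def pvOut (st : List (List String) × List String) : List String :=
  ((st.1 ++ (if st.2.isEmpty then [] else [st.2])).filter
    (fun g => !(startsMainB (PySem.Str.strip (g.headD ""))))).flatten

-- the common recursive characterisation of the kept lines, in A's skip-flag shape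
def pvRec : List String → Bool → List String
  | [], _ => []
  | l :: rest, skip =>
    if pvIsMain l then pvRec rest true
    else if skip then (if pvTop l then l :: pvRec rest false else pvRec rest true)
    else l :: pvRec rest false

theorem foldA_eq (ls : List String) (acc : List String) (skip : Bool) :
    (List.foldl pvStepA (acc, skip) ls).1 = acc ++ pvRec ls skip := by
  induction ls generalizing acc skip with
  | nil => simp [pvRec]
  | cons l rest ih =>
    rw [List.foldl_cons]
    by_cases hm : pvIsMain l = true
    · rw [show pvStepA (acc, skip) l = (acc, true) from by simp [pvStepA, hm]]
      rw [ih]; simp [pvRec, hm]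
    · cases hs : skip with
      | true =>
        by_cases htp : pvTop l = true
        · rw [show pvStepA (acc, true) l = (acc ++ [l], false) from by simp [pvStepA, hm, htp]]
          rw [ih]; simp [pvRec, hm, htp]
        · rw [show pvStepA (acc, true) l = (acc, true) from by simp [pvStepA, hm, htp]]
          rw [ih]; simp [pvRec, hm, htp]
      | false =>
        rw [show pvStepA (acc, false) l = (acc ++ [l], false) from by simp [pvStepA, hm]]
        rw [ih]; simp [pvRec, hm]

theorem foldB_groups_prefix (ls : List String) (gs0 gs : List (List String)) (cur : List String) :
    List.foldl pvStepB (gs0 ++ gs, cur) ls =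
      (gs0 ++ (List.foldl pvStepB (gs, cur) ls).1, (List.foldl pvStepB (gs, cur) ls).2) := by
  induction ls generalizing gs cur with
  | nil => simp
  | cons l rest ih =>
    rw [List.foldl_cons, List.foldl_cons]
    by_cases h : isHeaderB l = true
    · rw [show pvStepB (gs0 ++ gs, cur) l =
          (gs0 ++ (gs ++ (if cur.isEmpty then [] else [cur])), [l]) from by
        simp [pvStepB, h, List.append_assoc]]
      rw [show pvStepB (gs, cur) l = (gs ++ (if cur.isEmpty then [] else [cur]), [l]) from by
        simp [pvStepB, h]]
      exact ih _ _
    · rw [show pvStepB (gs0 ++ gs, cur) l = (gs0 ++ gs, cur ++ [l]) from by simp [pvStepB, h]]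
      rw [show pvStepB (gs, cur) l = (gs, cur ++ [l]) from by simp [pvStepB, h]]
      exact ih _ _

-- the current group contributes its lines iff it is not a main group
theorem pvCurFlat (cur : List String) (b : Bool)
    (h1 : cur = [] → b = false)
    (h2 : ∀ h t, cur = h :: t → b = pvIsMain h) :
    ((if cur.isEmpty then ([] : List (List String)) else [cur]).filter
      (fun g => !(startsMainB (PySem.Str.strip (g.headD ""))))).flatten
    = (if b then [] else cur) := by
  cases cur with
  | nil => simp [h1 rfl]
  | cons h t =>
    have hb : startsMainB (PySem.Str.strip h) = b := (h2 h t rfl).symm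
    cases b <;> simp [hb]

theorem foldB_main (ls : List String) (cur : List String) (b : Bool)
    (h1 : cur = [] → b = false)
    (h2 : ∀ h t, cur = h :: t → b = pvIsMain h) :
    pvOut (List.foldl pvStepB ([], cur) ls) = (if b then [] else cur) ++ pvRec ls b := by
  induction ls generalizing cur b with
  | nil =>
    rw [List.foldl_nil]
    show ((([] : List (List String)) ++ (if cur.isEmpty then [] else [cur])).filter
      (fun g => !(startsMainB (PySem.Str.strip (g.headD ""))))).flatten = _
    rw [List.nil_append, pvCurFlat cur b h1 h2]
    simp [pvRec]
  | cons l rest ih =>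
    rw [List.foldl_cons]
    by_cases hh : isHeaderB l = true
    · rw [show pvStepB ([], cur) l =
          ((if cur.isEmpty then ([] : List (List String)) else [cur]) ++ [], [l]) from by
        simp [pvStepB, hh]]
      rw [foldB_groups_prefix]
      have hI := ih [l] (pvIsMain l) (by intro h'; cases h') (by intro h t h'; cases h'; rfl)
      generalize hst : List.foldl pvStepB ([], [l]) rest = st
      rw [hst] at hI
      obtain ⟨gs1, cur1⟩ := st
      have hsplit : pvOut ((if cur.isEmpty then ([] : List (List String)) else [cur]) ++ gs1, cur1)
          = (if b then [] else cur) ++ pvOut (gs1, cur1) := by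
        show (((if cur.isEmpty then ([] : List (List String)) else [cur]) ++ gs1 ++
            (if cur1.isEmpty then [] else [cur1])).filter
            (fun g => !(startsMainB (PySem.Str.strip (g.headD ""))))).flatten = _
        rw [List.append_assoc, List.filter_append, List.flatten_append, pvCurFlat cur b h1 h2]
        rfl
      rw [hsplit, hI]
      have htail : ((if pvIsMain l then ([] : List String) else [l]) ++ pvRec rest (pvIsMain l))
          = pvRec (l :: rest) b := by
        by_cases hm : pvIsMain l = true
        · simp [pvRec, hm]
        · have ht : pvTop l = true := by
            have h' : (pvIsMain l || pvTop l) = true := by rw [← isHeaderB_eq]; exact hh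
            rw [Bool.not_eq_true] at hm
            rw [hm] at h'; simpa using h'
          cases b <;> simp [pvRec, hm, ht]
      rw [htail]
    · rw [show pvStepB ([], cur) l = ([], cur ++ [l]) from by simp [pvStepB, hh]]
      have hh' : isHeaderB l = false := by rw [Bool.not_eq_true] at hh; exact hh
      have hboth : (pvIsMain l || pvTop l) = false := by rw [← isHeaderB_eq]; exact hh'
      rw [Bool.or_eq_false_iff] at hboth
      obtain ⟨hm, ht⟩ := hboth
      rw [ih (cur ++ [l]) b (by intro h'; simp at h')
        (by
          intro h t h'
          cases cur with
          | nil =>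
            rw [List.nil_append] at h'
            cases h'
            rw [h1 rfl, hm]
          | cons c cs =>
            rw [List.cons_append] at h'
            injection h' with e1 _
            rw [← e1]
            exact h2 c cs rfl)]
      cases b <;> simp [pvRec, hm, ht]

-- ===== VERDICT (by name: the statement is the Claim_ definition above) =====
theorem strip_aver_main_py_spec : Claim_equal_strip_aver_main_py := by
  intro code _
  unfold Spec_strip_aver_main_py
  have hA : strip_aver_main_py code =
      PySem.Str.join "\n" (pvRec ((PySem.Str.split? code "\n").getD []) false) := by
    show PySem.Str.join "\n"
      (List.foldl pvStepA (([] : List String), false) ((PySem.Str.split? code "\n").getD [])).1 = _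
    rw [foldA_eq, List.nil_append]
  have hB : strip_aver_main_py_alt code =
      PySem.Str.join "\n" (pvRec ((PySem.Str.split? code "\n").getD []) false) := by
    show PySem.Str.join "\n"
      (pvOut (List.foldl pvStepB (([] : List (List String)), ([] : List String))
        ((PySem.Str.split? code "\n").getD []))) = _
    rw [foldB_main _ [] false (fun _ => rfl) (fun h t h' => by cases h')]
    simp
  rw [hA, hB]
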